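-- pv_equiv track=rewrite | github.com/zw0610/ps-worker-elastic | mnist-elastic-refactor/utils/enhanced_coordinator.py | is_cluster_spec_dict_equal
-- ===== SOURCE A (Python) =====
-- from typing import Dict, List, Any
--
-- def is_cluster_spec_dict_equal(old: Dict, new: Dict) -> bool:
--     old_replica_type = set(old.keys())
--     new_replica_type = set(new.keys())
--     if old_replica_type != new_replica_type:
--         return False
--
--     for replica_type in new_replica_type:
--         old_pods = set(old[replica_type])
--         new_pods = set(new[replica_type])
--         if old_pods != new_pods:
--             return False
--
--     return True
-- ===== SOURCE B (Python) =====
-- def _canon(d):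
--     return sorted(((k, sorted(set(v))) for k, v in d.items()),
--                   key=lambda kv: kv[0])
--
--
-- def is_cluster_spec_dict_equal(old, new):
--     return _canon(old) == _canon(new)
-- ===== Notes on version B (the rewrite author's own statement) =====
-- stated objective: alternative
-- what changed: Replaces the staged set-comparison logic (compare key sets, then loop comparing per-key value sets with early returns) by a sort-then-compare canonicalization: each dict is turned into a key-sorted list of (key, sorted deduplicated value list) and the two canonical lists are compared with a single list equality.
import Mathlib
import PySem

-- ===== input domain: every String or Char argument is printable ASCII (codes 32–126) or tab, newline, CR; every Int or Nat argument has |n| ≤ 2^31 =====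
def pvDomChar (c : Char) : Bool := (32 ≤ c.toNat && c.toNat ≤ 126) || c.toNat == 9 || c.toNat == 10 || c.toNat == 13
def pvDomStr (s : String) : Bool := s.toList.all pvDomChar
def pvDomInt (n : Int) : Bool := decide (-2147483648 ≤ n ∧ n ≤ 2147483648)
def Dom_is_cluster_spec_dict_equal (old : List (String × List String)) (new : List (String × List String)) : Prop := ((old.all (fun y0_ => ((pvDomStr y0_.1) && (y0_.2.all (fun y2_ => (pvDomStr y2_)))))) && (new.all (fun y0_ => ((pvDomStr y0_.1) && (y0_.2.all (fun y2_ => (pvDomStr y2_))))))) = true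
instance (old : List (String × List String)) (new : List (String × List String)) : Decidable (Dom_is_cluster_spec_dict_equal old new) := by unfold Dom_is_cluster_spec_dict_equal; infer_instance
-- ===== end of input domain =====

-- B replaces A's staged set comparisons (key sets, then a per-key loop with early returns) by a
-- sort-then-compare canonicalization: each dict becomes a key-sorted list of
-- (key, sorted deduplicated value list), and the two canonical lists are compared once.

-- ===== PORT A =====
-- the per-key loop 'for replica_type in new_replica_type: ... return False' with early exit;
-- old[replica_type]/new[replica_type] are ported as getD with default []: the loop runs only
-- after the key-set equality test succeeded, so the key is always present and the default unused
def pvPodsEqualAll (old : List (String × List String)) (new : List (String × List String)) : List String → Bool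
  | [] => true
  | k :: ks =>
      let old_pods := PySem.Set.ofList ((PySem.Dict.mk old).getD k [])
      let new_pods := PySem.Set.ofList ((PySem.Dict.mk new).getD k [])
      if !(PySem.Set.equal old_pods new_pods) then false
      else pvPodsEqualAll old new ks

def is_cluster_spec_dict_equal (old : List (String × List String)) (new : List (String × List String)) : Bool :=
  let old_replica_type := PySem.Set.ofList ((PySem.Dict.mk old).keys)
  let new_replica_type := PySem.Set.ofList ((PySem.Dict.mk new).keys)
  if !(PySem.Set.equal old_replica_type new_replica_type) then false
  else pvPodsEqualAll old new new_replica_type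

-- ===== PORT B =====
-- sorted(set(v))
def pvSortedSet (v : List String) : List String :=
  PySem.List.sorted (PySem.Set.ofList v) (fun x => x) false

-- sorted(((k, sorted(set(v))) for k, v in d.items()), key=lambda kv: kv[0])
def pvCanon (d : List (String × List String)) : List (String × List String) :=
  PySem.List.sorted ((PySem.Dict.mk d).items.map (fun kv => (kv.1, pvSortedSet kv.2)))
    (fun kv => kv.1) false

def is_cluster_spec_dict_equal_alt (old : List (String × List String)) (new : List (String × List String)) : Bool :=
  pvCanon old == pvCanon new

-- ===== PRECONDITION & SPEC =====
-- The arguments encode Python dicts, which cannot contain duplicate keys; association lists with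
-- a repeated key correspond to no Python input, so Pre_ requires the keys of each to be distinct.
def Pre_is_cluster_spec_dict_equal (old : List (String × List String)) (new : List (String × List String)) : Prop :=
  (old.map Prod.fst).Nodup ∧ (new.map Prod.fst).Nodup

instance (old : List (String × List String)) (new : List (String × List String)) : Decidable (Pre_is_cluster_spec_dict_equal old new) := by unfold Pre_is_cluster_spec_dict_equal; infer_instance

def pvWitness_is_cluster_spec_dict_equal : (List (String × List String)) × (List (String × List String)) :=
  ([("ps", ["a", "b"]), ("worker", ["w0"])], [("worker", ["w0"]), ("ps", ["b", "a"])])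

def Spec_is_cluster_spec_dict_equal (old : List (String × List String)) (new : List (String × List String)) (out : Bool) : Prop := out = is_cluster_spec_dict_equal_alt old new
instance (old : List (String × List String)) (new : List (String × List String)) (out : Bool) : Decidable (Spec_is_cluster_spec_dict_equal old new out) := by unfold Spec_is_cluster_spec_dict_equal; infer_instance

-- ===== CLAIM (what is proved, stated in full; the proofs are below) =====
def Claim_equal_is_cluster_spec_dict_equal : Prop := ∀ (old : List (String × List String)) (new : List (String × List String)), Dom_is_cluster_spec_dict_equal old new → Pre_is_cluster_spec_dict_equal old new → Spec_is_cluster_spec_dict_equal old new (is_cluster_spec_dict_equal old new)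

-- ===== LEMMAS AND PROOFS =====
lemma pvPodsEqualAll_iff (old new : List (String × List String)) (ks : List String) :
    pvPodsEqualAll old new ks = true ↔
      ∀ k ∈ ks, ∀ x, x ∈ (PySem.Dict.mk old).getD k [] ↔ x ∈ (PySem.Dict.mk new).getD k [] := by
  induction ks with
  | nil => simp [pvPodsEqualAll]
  | cons k ks ih =>
      simp only [pvPodsEqualAll]
      cases hq : PySem.Set.equal (PySem.Set.ofList ((PySem.Dict.mk old).getD k []))
          (PySem.Set.ofList ((PySem.Dict.mk new).getD k [])) with
      | true =>
          have hk : ∀ x, x ∈ (PySem.Dict.mk old).getD k [] ↔ x ∈ (PySem.Dict.mk new).getD k [] := by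
            have := (PySem.Set.equal_iff _ _).mp hq
            simpa [PySem.Set.mem_ofList] using this
          simp [ih, hk]
      | false =>
          have hk : ¬ ∀ x, x ∈ (PySem.Dict.mk old).getD k [] ↔ x ∈ (PySem.Dict.mk new).getD k [] := by
            intro h
            have : PySem.Set.equal (PySem.Set.ofList ((PySem.Dict.mk old).getD k []))
                (PySem.Set.ofList ((PySem.Dict.mk new).getD k [])) = true := by
              rw [PySem.Set.equal_iff]; simpa [PySem.Set.mem_ofList] using h
            simp [hq] at this
          constructor
          · intro h; simp at h
          · intro h
            exact absurd (hk (h k (by simp))) (by simp)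

lemma pv_hA (old new : List (String × List String))
    (ho : (old.map Prod.fst).Nodup) (hn : (new.map Prod.fst).Nodup) :
    is_cluster_spec_dict_equal old new = true ↔
      ((∀ x, x ∈ old.map Prod.fst ↔ x ∈ new.map Prod.fst) ∧
        ∀ k ∈ new.map Prod.fst, ∀ x,
          x ∈ (PySem.Dict.mk old).getD k [] ↔ x ∈ (PySem.Dict.mk new).getD k []) := by
  unfold is_cluster_spec_dict_equal
  rw [PySem.Dict.keys_mk, PySem.Dict.keys_mk,
      PySem.Set.ofList_eq_self_of_nodup _ ho, PySem.Set.ofList_eq_self_of_nodup _ hn]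
  cases hq : PySem.Set.equal (old.map Prod.fst) (new.map Prod.fst) with
  | true =>
      have hk := (PySem.Set.equal_iff _ _).mp hq
      simp [pvPodsEqualAll_iff, hk]
  | false =>
      have hk : ¬ ∀ x, x ∈ old.map Prod.fst ↔ x ∈ new.map Prod.fst := by
        intro h
        have := (PySem.Set.equal_iff (old.map Prod.fst) (new.map Prod.fst)).mpr h
        simp [hq] at this
      simp only [hq, Bool.not_false, if_true]
      constructor
      · intro h; exact absurd h (by simp)
      · intro h; exact absurd (hk h.1) (by simp)

-- the canonicalizing map applied to one item
def pvF (kv : String × List String) : String × List String := (kv.1, pvSortedSet kv.2)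

lemma pv_mem_sortedSet (v : List String) (x : String) : x ∈ pvSortedSet v ↔ x ∈ v := by
  simp [pvSortedSet, PySem.List.mem_sorted, PySem.Set.mem_ofList]

lemma pv_sortedSet_eq_of_memiff (v w : List String) (h : ∀ x, x ∈ v ↔ x ∈ w) :
    pvSortedSet v = pvSortedSet w := by
  unfold pvSortedSet
  apply PySem.List.sorted_eq_sorted_of_perm _ _ _ (fun a b hab => hab)
  apply (List.perm_ext_iff_of_nodup (PySem.Set.nodup_ofList _) (PySem.Set.nodup_ofList _)).mpr
  intro x
  simp [PySem.Set.mem_ofList, h x]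

lemma pv_getD_assoc (d : List (String × List String)) (hd : (d.map Prod.fst).Nodup)
    (kv : String × List String) (hkv : kv ∈ d) :
    (PySem.Dict.mk d).getD kv.1 [] = kv.2 := by
  apply PySem.Dict.getD_of_mem_items
  · simpa using hkv
  · simpa [PySem.Dict.keys_mk, PySem.Set.ofList_eq_self_of_nodup _ hd] using hd

lemma pv_canon_perm (d : List (String × List String)) : (pvCanon d).Perm (d.map pvF) := by
  unfold pvCanon
  have h := PySem.List.sorted_perm ((PySem.Dict.mk d).items.map (fun kv => (kv.1, pvSortedSet kv.2)))
      (fun kv : String × List String => kv.1) false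
  simpa [pvF] using h

lemma pv_canon_pairwise_lt (d : List (String × List String))
    (hd : (d.map Prod.fst).Nodup) :
    (pvCanon d).Pairwise (fun a b => a.1 < b.1) := by
  have hle : (pvCanon d).Pairwise (fun a b : String × List String => a.1 ≤ b.1) := by
    have := PySem.List.sorted_pairwise ((PySem.Dict.mk d).items.map (fun kv => (kv.1, pvSortedSet kv.2)))
        (fun kv : String × List String => kv.1)
    simpa [pvCanon] using this
  have hmapfst : (d.map pvF).map Prod.fst = d.map Prod.fst := by
    simp [pvF, Function.comp]
  have hnd : ((pvCanon d).map Prod.fst).Nodup := by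
    have hp : ((pvCanon d).map Prod.fst).Perm ((d.map pvF).map Prod.fst) :=
      (pv_canon_perm d).map Prod.fst
    rw [hmapfst] at hp
    exact hp.nodup_iff.mpr hd
  have hne : (pvCanon d).Pairwise (fun a b : String × List String => a.1 ≠ b.1) :=
    List.pairwise_map.mp hnd
  exact (hle.and hne).imp (fun h => lt_of_le_of_ne h.1 h.2)

lemma pv_canon_eq_of_perm (old new : List (String × List String))
    (hn : (new.map Prod.fst).Nodup)
    (hperm : (old.map pvF).Perm (new.map pvF)) :
    pvCanon old = pvCanon new := by
  unfold pvCanon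
  apply PySem.List.sorted_eq_of_perm_of_pairwise_lt
  · have h1 : (pvCanon new).Perm (old.map pvF) := (pv_canon_perm new).trans hperm.symm
    simpa [pvCanon, pvF] using h1
  · have := pv_canon_pairwise_lt new hn
    simpa [pvCanon] using this

lemma pv_perm_iff (old new : List (String × List String))
    (ho : (old.map Prod.fst).Nodup) (hn : (new.map Prod.fst).Nodup) :
    (old.map pvF).Perm (new.map pvF) ↔
      ((∀ x, x ∈ old.map Prod.fst ↔ x ∈ new.map Prod.fst) ∧
        ∀ k ∈ new.map Prod.fst, ∀ x,
          x ∈ (PySem.Dict.mk old).getD k [] ↔ x ∈ (PySem.Dict.mk new).getD k []) := by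
  have hmapo : (old.map pvF).map Prod.fst = old.map Prod.fst := by simp [pvF, Function.comp]
  have hmapn : (new.map pvF).map Prod.fst = new.map Prod.fst := by simp [pvF, Function.comp]
  constructor
  · intro hperm
    have hkeys : ∀ x, x ∈ old.map Prod.fst ↔ x ∈ new.map Prod.fst := by
      intro x
      have := (hperm.map Prod.fst).mem_iff (a := x)
      rwa [hmapo, hmapn] at this
    refine ⟨hkeys, ?_⟩
    intro k hk x
    obtain ⟨kw, hkw, rfl⟩ := List.mem_map.mp hk
    have hmemn : pvF kw ∈ new.map pvF := List.mem_map.mpr ⟨kw, hkw, rfl⟩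
    have hmemo : pvF kw ∈ old.map pvF := hperm.mem_iff.mpr hmemn
    obtain ⟨kv, hkv, hfe⟩ := List.mem_map.mp hmemo
    have hk1 : kv.1 = kw.1 := by simpa [pvF] using congrArg (fun p => p.1) hfe
    have hs : pvSortedSet kv.2 = pvSortedSet kw.2 := by
      simpa [pvF] using congrArg (fun p => p.2) hfe
    have hgo : (PySem.Dict.mk old).getD kw.1 [] = kv.2 := by
      rw [← hk1]; exact pv_getD_assoc old ho kv hkv
    have hgn : (PySem.Dict.mk new).getD kw.1 [] = kw.2 := pv_getD_assoc new hn kw hkw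
    rw [hgo, hgn]
    rw [← pv_mem_sortedSet kv.2 x, hs, pv_mem_sortedSet]
  · rintro ⟨hkeys, hpods⟩
    have hndo : (old.map pvF).Nodup := by
      have : ((old.map pvF).map Prod.fst).Nodup := by rw [hmapo]; exact ho
      exact this.of_map Prod.fst
    have hndn : (new.map pvF).Nodup := by
      have : ((new.map pvF).map Prod.fst).Nodup := by rw [hmapn]; exact hn
      exact this.of_map Prod.fst
    apply (List.perm_ext_iff_of_nodup hndo hndn).mpr
    intro p
    constructor
    · intro hp
      obtain ⟨kv, hkv, rfl⟩ := List.mem_map.mp hp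
      have hk : kv.1 ∈ new.map Prod.fst :=
        (hkeys kv.1).mp (List.mem_map.mpr ⟨kv, hkv, rfl⟩)
      obtain ⟨kw, hkw, hk1⟩ := List.mem_map.mp hk
      have hiff := hpods kv.1 hk
      rw [pv_getD_assoc old ho kv hkv] at hiff
      have hgn : (PySem.Dict.mk new).getD kv.1 [] = kw.2 := by
        rw [← hk1]; exact pv_getD_assoc new hn kw hkw
      rw [hgn] at hiff
      have : pvF kv = pvF kw := by
        unfold pvF; rw [hk1, pv_sortedSet_eq_of_memiff kv.2 kw.2 hiff]
      rw [this]
      exact List.mem_map.mpr ⟨kw, hkw, rfl⟩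
    · intro hp
      obtain ⟨kw, hkw, rfl⟩ := List.mem_map.mp hp
      have hk : kw.1 ∈ new.map Prod.fst := List.mem_map.mpr ⟨kw, hkw, rfl⟩
      obtain ⟨kv, hkv, hk1⟩ := List.mem_map.mp ((hkeys kw.1).mpr hk)
      have hiff := hpods kw.1 hk
      have hgo : (PySem.Dict.mk old).getD kw.1 [] = kv.2 := by
        rw [← hk1]; exact pv_getD_assoc old ho kv hkv
      rw [hgo, pv_getD_assoc new hn kw hkw] at hiff
      have : pvF kw = pvF kv := by
        unfold pvF; rw [← hk1, pv_sortedSet_eq_of_memiff kw.2 kv.2 (fun x => (hiff x).symm)]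
      rw [this]
      exact List.mem_map.mpr ⟨kv, hkv, rfl⟩

theorem pv_main (old new : List (String × List String))
    (ho : (old.map Prod.fst).Nodup) (hn : (new.map Prod.fst).Nodup) :
    is_cluster_spec_dict_equal old new = is_cluster_spec_dict_equal_alt old new := by
  apply Bool.coe_iff_coe.mp
  rw [pv_hA old new ho hn]
  unfold is_cluster_spec_dict_equal_alt
  rw [beq_iff_eq]
  rw [← pv_perm_iff old new ho hn]
  constructor
  · intro hperm
    exact pv_canon_eq_of_perm old new hn hperm
  · intro h
    exact ((pv_canon_perm old).symm.trans (h ▸ pv_canon_perm new)).symm.symm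

-- ===== VERDICT (by name: the statement is the Claim_ definition above) =====
theorem is_cluster_spec_dict_equal_spec : Claim_equal_is_cluster_spec_dict_equal := by
  intro old new _ hpre
  exact pv_main old new hpre.1 hpre.2
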